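-- pv_equiv track=rewrite | github.com/vxqzn/data-foundations | python/coachpy/stage1.py | sum_safe_macros
-- ===== SOURCE A (Python) =====
-- def sum_safe_macros(log):
--     total = 0
--     for item in log:
--         if item is None:
--             continue
--         value = int(item)
--         if value < 0:
--             break
--         total += value
--     return total
-- ===== SOURCE B (Python) =====
-- def sum_safe_macros(log):
--     vals = [int(x) for x in log if x is not None]
--     cut = next((i for i, v in enumerate(vals) if v < 0), len(vals))
--     return sum(vals[:cut])
-- ===== Notes on version B (the rewrite author's own statement) =====
-- stated objective: alternative
-- what changed: A's single accumulator loop with continue/break is replaced by staged passes: materialise the non-None values, locate the cut index of the first negative with next(enumerate...), then sum the slice before the cut.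
import Mathlib
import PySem

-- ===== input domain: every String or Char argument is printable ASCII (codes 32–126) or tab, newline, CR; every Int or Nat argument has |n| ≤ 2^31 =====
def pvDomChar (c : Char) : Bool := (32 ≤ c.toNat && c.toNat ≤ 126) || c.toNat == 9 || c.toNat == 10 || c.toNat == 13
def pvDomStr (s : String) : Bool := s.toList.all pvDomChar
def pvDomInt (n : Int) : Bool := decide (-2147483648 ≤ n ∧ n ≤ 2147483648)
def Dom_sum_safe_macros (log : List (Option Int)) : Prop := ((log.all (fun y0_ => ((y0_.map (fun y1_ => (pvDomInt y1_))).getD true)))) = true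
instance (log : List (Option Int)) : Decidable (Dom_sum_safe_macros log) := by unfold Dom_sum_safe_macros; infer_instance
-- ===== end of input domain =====

-- B replaces A's single accumulator loop (continue/break) by staged passes: collect the
-- non-None values, find the cut index of the first negative, and sum the slice before it.

-- ===== PORT A =====
-- literal port of A's loop: accumulator `total`, skip None, break on negative
def sum_safe_macros_go (total : Int) (log : List (Option Int)) : Int :=
  match log with
  | [] => total
  | none :: rest => sum_safe_macros_go total rest          -- continue
  | some v :: rest => if v < 0 then total                  -- break → return total
                      else sum_safe_macros_go (total + v) rest

def sum_safe_macros (log : List (Option Int)) : Int :=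
  sum_safe_macros_go 0 log

-- ===== PORT B =====
-- staged: vals = non-None values; cut = index of first negative (default len); sum vals[:cut]
def sum_safe_macros_alt (log : List (Option Int)) : Int :=
  let vals := log.filterMap (fun x => x)   -- [int(x) for x in log if x is not None] (int is identity on ints)
  let cut := (vals.findIdx? (fun v => decide (v < 0))).getD vals.length
  (vals.take cut).sum

-- ===== PRECONDITION & SPEC =====
def Spec_sum_safe_macros (log : List (Option Int)) (out : Int) : Prop := out = sum_safe_macros_alt log
instance (log : List (Option Int)) (out : Int) : Decidable (Spec_sum_safe_macros log out) := by unfold Spec_sum_safe_macros; infer_instance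

-- ===== CLAIM (what is proved, stated in full; the proofs are below) =====
def Claim_equal_sum_safe_macros : Prop := ∀ (log : List (Option Int)), Dom_sum_safe_macros log → Spec_sum_safe_macros log (sum_safe_macros log)

-- ===== LEMMAS AND PROOFS =====
theorem sum_safe_macros_go_eq (log : List (Option Int)) (total : Int) :
    sum_safe_macros_go total log = total + sum_safe_macros_alt log := by
  induction log generalizing total with
  | nil => simp [sum_safe_macros_go, sum_safe_macros_alt]
  | cons h rest ih =>
    cases h with
    | none => simpa [sum_safe_macros_go, sum_safe_macros_alt] using ih total
    | some v =>
      by_cases hv : v < 0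
      · simp [sum_safe_macros_go, hv, sum_safe_macros_alt, List.findIdx?_cons]
      · have := ih (total + v)
        simp only [sum_safe_macros_alt] at this ⊢
        simp only [sum_safe_macros_go, hv, if_false, this]
        cases hfi : (rest.filterMap (fun x => x)).findIdx? (fun v => decide (v < 0)) with
        | none => simp [List.findIdx?_cons, hv, hfi, add_assoc]
        | some i => simp [List.findIdx?_cons, hv, hfi, add_assoc]

-- ===== VERDICT (by name: the statement is the Claim_ definition above) =====
theorem sum_safe_macros_spec : Claim_equal_sum_safe_macros := by
  intro log _
  unfold Spec_sum_safe_macros sum_safe_macros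
  simpa using sum_safe_macros_go_eq log 0
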